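-- pv_equiv track=rewrite | github.com/mindspore-lab/mindnlp | mindtorch/ops/array.py | _get_moved_perm
-- ===== SOURCE A (Python) =====
-- import operator
-- import builtins
--
-- def _get_moved_perm(ndim, source, destination):
--     """
--     Helper function for movedim, returns permutation after moving axis
--     from source to destination.
--     """
--     dest_sorted_idx = [i for i, _ in sorted(enumerate(destination), key=operator.itemgetter(1))]
--     axis_orig = [i for i in builtins.range(0, ndim) if i not in source]
--
--     k = 0
--     m = 0
--     perm = []
--     for i in dest_sorted_idx:
--         # inserts an axis that has been moved, denoted by n, and axis that remain
--         # in their original position, indexed from k to k + n - m, into index m in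
--         # the list of permuted axis
--         n = destination[i]
--         j = k + n - m
--         perm += axis_orig[k:j]
--         perm.append(source[i])
--         k += n - m
--         m = n + 1
--     perm += axis_orig[k:]
--     return tuple(perm)
-- ===== SOURCE B (Python) =====
-- def _get_moved_perm(ndim, source, destination):
--     """Selection-based assembly: repeatedly pull the pair with the smallest
--     destination out of the pending list (no sorting pass, no argsort index
--     indirection, no k/m pointer pair) and emit the unmoved axes up to its
--     boundary."""
--     axis = [a for a in range(ndim) if a not in source]
--     pending = list(zip(destination, source))
--     perm = []
--     lo = 0
--     t = 0
--     while pending: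
--         best = pending[0]
--         for p in pending[1:]:
--             if p[0] < best[0]:
--                 best = p
--         pending.remove(best)
--         d, s = best
--         perm += axis[lo:d - t]
--         perm.append(s)
--         lo = d - t
--         t += 1
--     return tuple(perm + axis[lo:])
-- ===== Notes on version B (the rewrite author's own statement) =====
-- stated objective: alternative
-- what changed: A argsorts the destination indices with a stable sort and then assembles the permutation in a second pass that indexes back into destination/source while maintaining the k/m pointer pair; B never sorts: it keeps a pending list of (destination, source) pairs and repeatedly extracts the minimum-destination pair (first-minimal scan + list.remove), emitting the unmoved axes up to each boundary directly. Pre_ only excludes destinations longer than source, where A raises IndexError.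
import Mathlib
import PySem

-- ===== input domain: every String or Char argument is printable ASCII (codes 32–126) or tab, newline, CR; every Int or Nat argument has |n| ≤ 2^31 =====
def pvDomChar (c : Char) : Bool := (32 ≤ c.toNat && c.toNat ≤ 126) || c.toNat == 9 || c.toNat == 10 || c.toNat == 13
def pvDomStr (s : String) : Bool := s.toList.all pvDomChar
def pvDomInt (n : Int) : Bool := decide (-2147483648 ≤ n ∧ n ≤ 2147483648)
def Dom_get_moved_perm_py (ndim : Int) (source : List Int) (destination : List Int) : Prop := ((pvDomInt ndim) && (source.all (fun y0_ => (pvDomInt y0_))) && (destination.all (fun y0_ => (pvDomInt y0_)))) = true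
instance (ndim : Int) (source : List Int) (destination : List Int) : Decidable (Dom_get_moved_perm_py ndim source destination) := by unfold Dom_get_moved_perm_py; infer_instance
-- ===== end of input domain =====

-- B replaces A's argsort-then-assemble pipeline (stable sort of destination indices, then a
-- fold maintaining the k/m pointer pair) by selection-based assembly: repeatedly extract the
-- minimum-destination pair from the pending list and emit directly (alternative decomposition).

-- ===== PORT A =====
def get_moved_perm_py (ndim : Int) (source : List Int) (destination : List Int) : List Int :=
  let dest_sorted_idx : List Int :=
    (PySem.List.sorted (PySem.List.enumerate destination) (fun p => p.2)).map (fun p => p.1)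
  let axis_orig : List Int := (PySem.List.pyRange 0 ndim 1).filter (fun i => decide (i ∉ source))
  let st := dest_sorted_idx.foldl (fun (st : Int × Int × List Int) i =>
      let n := PySem.List.pyGetD destination i 0
      let j := st.1 + n - st.2.1
      (st.1 + (n - st.2.1), n + 1,
        st.2.2 ++ PySem.List.slice axis_orig (some st.1) (some j) ++ [PySem.List.pyGetD source i 0]))
    (0, 0, ([] : List Int))
  st.2.2 ++ PySem.List.slice axis_orig (some st.1) none

-- ===== PORT B =====
-- the min-scan of B's inner for-loop ('best = pending[0]; for p in pending[1:]: …')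
def pvBest (qs : List (Int × Int)) (q : Int × Int) : Int × Int :=
  qs.foldl (fun best p => if p.1 < best.1 then p else best) q

-- the min-scan produces an element of the pending list (cited by pvEmit's termination proof)
lemma pv_best_mem (qs : List (Int × Int)) (q : Int × Int) : pvBest qs q ∈ q :: qs := by
  unfold pvBest
  induction qs generalizing q with
  | nil => simp
  | cons p qs ih =>
      simp only [List.foldl_cons]
      have h := ih (if p.1 < q.1 then p else q)
      rcases List.mem_cons.1 h with h | h
      · rw [h]; split_ifs <;> simp
      · simp [h]

-- list.remove of a present element shortens the list (cited by pvEmit's termination proof)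
lemma pv_remove_getD_length (xs : List (Int × Int)) (v : Int × Int) (h : v ∈ xs) :
    ((PySem.List.remove? xs v).getD []).length < xs.length := by
  simp only [PySem.List.remove?]
  obtain ⟨k, hk⟩ := Option.isSome_iff_exists.1 (List.isSome_idxOf?.2 h)
  obtain ⟨hklt, -⟩ := List.idxOf?_eq_some_iff.1 hk
  rw [hk]
  simp only [Option.map_some, Option.getD_some]
  rw [List.length_eraseIdx]
  simp [hklt]
  omega

-- port of B's while-loop: state (pending, lo, t, perm)
def pvEmit (axis : List Int) : List (Int × Int) → Int → Int → List Int → List Int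
  | [], lo, _, perm => perm ++ PySem.List.slice axis (some lo) none
  | q :: qs, lo, t, perm =>
      pvEmit axis ((PySem.List.remove? (q :: qs) (pvBest qs q)).getD [])
        ((pvBest qs q).1 - t) (t + 1)
        (perm ++ PySem.List.slice axis (some lo) (some ((pvBest qs q).1 - t)) ++ [(pvBest qs q).2])
  termination_by pending => pending.length
  decreasing_by exact pv_remove_getD_length _ _ (pv_best_mem qs q)

def get_moved_perm_py_alt (ndim : Int) (source : List Int) (destination : List Int) : List Int :=
  let axis : List Int := (PySem.List.pyRange 0 ndim 1).filter (fun a => decide (a ∉ source))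
  pvEmit axis (destination.zip source) 0 0 []

-- ===== PRECONDITION & SPEC =====
-- A raises IndexError (source[i]) exactly when destination is longer than source; Pre_ excludes only that.
def Pre_get_moved_perm_py (ndim : Int) (source : List Int) (destination : List Int) : Prop :=
  destination.length ≤ source.length
instance (ndim : Int) (source : List Int) (destination : List Int) : Decidable (Pre_get_moved_perm_py ndim source destination) := by unfold Pre_get_moved_perm_py; infer_instance
def pvWitness_get_moved_perm_py : Int × List Int × List Int := (3, [0], [2])

def Spec_get_moved_perm_py (ndim : Int) (source : List Int) (destination : List Int) (out : List Int) : Prop := out = get_moved_perm_py_alt ndim source destination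
instance (ndim : Int) (source : List Int) (destination : List Int) (out : List Int) : Decidable (Spec_get_moved_perm_py ndim source destination out) := by unfold Spec_get_moved_perm_py; infer_instance

-- ===== CLAIM (what is proved, stated in full; the proofs are below) =====
def Claim_equal_get_moved_perm_py : Prop := ∀ (ndim : Int) (source : List Int) (destination : List Int), Dom_get_moved_perm_py ndim source destination → Pre_get_moved_perm_py ndim source destination → Spec_get_moved_perm_py ndim source destination (get_moved_perm_py ndim source destination)

-- ===== LEMMAS AND PROOFS =====

-- insertBy commutes with map when the comparison is through the map
lemma pv_map_insertBy {α β : Type} (f : α → β) (k : β → Int) (x : α) (ys : List α) :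
    (PySem.List.insertBy (fun a b => decide (k (f a) < k (f b))) x ys).map f
      = PySem.List.insertBy (fun a b => decide (k a < k b)) (f x) (ys.map f) := by
  induction ys with
  | nil => simp [PySem.List.insertBy]
  | cons y t ih =>
      simp only [PySem.List.insertBy, List.map_cons]
      by_cases h : k (f x) < k (f y)
      · simp [h]
      · simp [h, ih]

lemma pv_map_sorted_aux {α β : Type} (f : α → β) (k : β → Int) (xs : List α) :
    ∀ acc : List α,
      (xs.foldl (fun acc x => PySem.List.insertBy (fun a b => decide (k (f a) < k (f b))) x acc) acc).map f
        = (xs.map f).foldl (fun acc x => PySem.List.insertBy (fun a b => decide (k a < k b)) x acc) (acc.map f) := by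
  induction xs with
  | nil => intro acc; simp
  | cons x t ih =>
      intro acc
      simp only [List.map_cons, List.foldl_cons]
      rw [ih, pv_map_insertBy]

-- a stable key-sort through a map: map f (sorted xs (k ∘ f)) = sorted (map f xs) k
lemma pv_map_sorted {α β : Type} (f : α → β) (k : β → Int) (xs : List α) :
    (PySem.List.sorted xs (fun a => k (f a))).map f = PySem.List.sorted (xs.map f) k := by
  rw [PySem.List.sorted_eq_foldl_insertBy, PySem.List.sorted_eq_foldl_insertBy]
  simpa using pv_map_sorted_aux f k xs []

-- reading back the enumerated pairs through indexing reproduces zip (when source is long enough)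
lemma pv_enum_map_zip (s : List Int) :
    ∀ (d : List Int) (off : Nat), off + d.length ≤ s.length →
      (PySem.List.enumerate d (off : Int)).map (fun p => (p.2, PySem.List.pyGetD s p.1 0))
        = d.zip (s.drop off) := by
  intro d
  induction d with
  | nil => intro off h; simp [PySem.List.enumerate]
  | cons x t ih =>
      intro off h
      have hofflt : off < s.length := by simp at h; omega
      rw [PySem.List.enumerate_cons, List.map_cons]
      have h1 : PySem.List.pyGetD s (off : Int) 0 = s[off] := by
        rw [PySem.List.pyGetD_natCast]
        exact List.getD_eq_getElem s 0 hofflt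
      have h2 : ((off : Int) + 1) = ((off + 1 : Nat) : Int) := by push_cast; ring
      have h3 : s.drop off = s[off] :: s.drop (off + 1) :=
        List.drop_eq_getElem_cons hofflt
      rw [h1, h2, ih (off + 1) (by simp at h ⊢; omega), h3]
      rfl

-- folding further insertions over a list headed by a minimal element keeps it in front
lemma pv_foldl_ins_cons (m : Int × Int) :
    ∀ (L : List (Int × Int)) (acc : List (Int × Int)), (∀ p ∈ L, ¬ p.1 < m.1) →
      L.foldl (fun acc x => PySem.List.insertBy (fun a b => decide (a.1 < b.1)) x acc) (m :: acc)
        = m :: L.foldl (fun acc x => PySem.List.insertBy (fun a b => decide (a.1 < b.1)) x acc) acc := by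
  intro L
  induction L with
  | nil => intro acc _; rfl
  | cons p L ih =>
      intro acc h
      simp only [List.foldl_cons]
      have hpm : ¬ p.1 < m.1 := h p (by simp)
      rw [show PySem.List.insertBy (fun a b => decide (a.1 < b.1)) p (m :: acc)
            = m :: PySem.List.insertBy (fun a b => decide (a.1 < b.1)) p acc by
          simp [PySem.List.insertBy, hpm]]
      exact ih _ (fun r hr => h r (by simp [hr]))

-- inserting a strictly minimal element prepends it
lemma pv_insertBy_min (m : Int × Int) (P : List (Int × Int)) (h : ∀ p ∈ P, m.1 < p.1) :
    PySem.List.insertBy (fun a b => decide (a.1 < b.1)) m P = m :: P := by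
  cases P with
  | nil => rfl
  | cons y ys => simp [PySem.List.insertBy, h y (by simp)]

-- SELECTION step of a stable sort: the first minimal element heads the sorted list, and the
-- rest is the sorted remainder
lemma pv_sorted_select (pre post : List (Int × Int)) (m : Int × Int)
    (hpre : ∀ p ∈ pre, m.1 < p.1) (hpost : ∀ p ∈ post, m.1 ≤ p.1) :
    PySem.List.sorted (pre ++ m :: post) (fun p => p.1)
      = m :: PySem.List.sorted (pre ++ post) (fun p => p.1) := by
  rw [PySem.List.sorted_eq_foldl_insertBy, PySem.List.sorted_eq_foldl_insertBy,
    List.foldl_append, List.foldl_cons, List.foldl_append]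
  have hP : ∀ p ∈ pre.foldl
      (fun acc x => PySem.List.insertBy (fun a b => decide (a.1 < b.1)) x acc) [], m.1 < p.1 := by
    intro p hp
    apply hpre
    rw [← PySem.List.sorted_eq_foldl_insertBy] at hp
    exact (PySem.List.mem_sorted _ _ _ _).1 hp
  rw [pv_insertBy_min _ _ hP]
  exact pv_foldl_ins_cons m post _ (fun p hp => by have := hpost p hp; omega)

-- the min-scan result is a lower bound for every element
lemma pv_best_min : ∀ (qs : List (Int × Int)) (q : Int × Int), ∀ r ∈ q :: qs,
    (pvBest qs q).1 ≤ r.1 := by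
  intro qs
  induction qs with
  | nil => intro q r hr; simp at hr; simp [pvBest, hr]
  | cons p qs ih =>
      intro q r hr
      simp only [pvBest, List.foldl_cons] at *
      have hh := ih (if p.1 < q.1 then p else q) (if p.1 < q.1 then p else q) (by simp)
      have hle : (if p.1 < q.1 then p else q).1 ≤ q.1 ∧ (if p.1 < q.1 then p else q).1 ≤ p.1 := by
        split_ifs <;> constructor <;> omega
      rcases List.mem_cons.1 hr with rfl | hr
      · omega
      rcases List.mem_cons.1 hr with rfl | hr
      · omega
      · exact ih (if p.1 < q.1 then p else q) r (by simp [hr])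

-- the min-scan result is the FIRST minimal element: everything before it is strictly larger
lemma pv_best_split : ∀ (qs : List (Int × Int)) (q : Int × Int), ∃ pre post,
    q :: qs = pre ++ (pvBest qs q) :: post ∧ ∀ p ∈ pre, (pvBest qs q).1 < p.1 := by
  intro qs
  induction qs with
  | nil => intro q; exact ⟨[], [], rfl, by simp⟩
  | cons p qs ih =>
      intro q
      simp only [pvBest, List.foldl_cons] at *
      by_cases hpq : p.1 < q.1
      · rw [if_pos hpq]
        obtain ⟨pre, post, heq, hpre⟩ := ih p
        refine ⟨q :: pre, post, by rw [List.cons_append, ← heq], ?_⟩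
        intro r hr
        rcases List.mem_cons.1 hr with rfl | hr
        · have := pv_best_min qs p p (by simp)
          simp only [pvBest] at this
          omega
        · exact hpre r hr
      · rw [if_neg hpq]
        set b := qs.foldl (fun best p => if p.1 < best.1 then p else best) q with hb
        obtain ⟨pre, post, heq, hpre⟩ := ih q
        rw [← hb] at heq hpre
        cases pre with
        | nil =>
            simp only [List.nil_append, List.cons.injEq] at heq
            obtain ⟨hq, hqs⟩ := heq
            exact ⟨[], p :: qs, by rw [List.nil_append, ← hq], by simp⟩
            
        | cons a pre' =>
            simp only [List.cons_append, List.cons.injEq] at heq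
            obtain ⟨rfl, hqs⟩ := heq
            refine ⟨q :: p :: pre', post, ?_, ?_⟩
            · rw [List.cons_append, List.cons_append]
              exact congrArg (fun l => q :: p :: l) hqs
            · intro r hr
              have ha := hpre q (by simp)
              rcases List.mem_cons.1 hr with rfl | hr
              · exact ha
              rcases List.mem_cons.1 hr with rfl | hr
              · omega
              · exact hpre r (by simp [hr])

-- removing the first minimal element removes exactly its position
lemma pv_remove_prefix (post : List (Int × Int)) (m : Int × Int) :
    ∀ (pre : List (Int × Int)), (∀ p ∈ pre, p ≠ m) →
      PySem.List.remove? (pre ++ m :: post) m = some (pre ++ post) := by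
  intro pre
  induction pre with
  | nil =>
      intro _
      simp [PySem.List.remove?, List.idxOf?_cons]
  | cons a pre ih =>
      intro h
      have ha : (a == m) = false := by
        simpa using h a (by simp)
      have ih' := ih (fun p hp => h p (by simp [hp]))
      simp only [PySem.List.remove?] at ih' ⊢
      rw [List.cons_append, List.idxOf?_cons, ha]
      simp only [Bool.false_eq_true, if_false]
      cases hidx : List.idxOf? m (pre ++ m :: post) with
      | none => rw [hidx] at ih'; simp at ih'
      | some k =>
          rw [hidx] at ih'
          simp only [Option.map_some, Option.some.injEq] at ih'
          simp [List.eraseIdx_cons_succ, ih']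

-- A's fold over the stably sorted pairs equals B's selection loop (total: raw Int boundaries)
lemma pv_fold_emit (axis : List Int) :
    ∀ (n : Nat) (pairs : List (Int × Int)), pairs.length = n →
    ∀ (k mm t : Int) (perm : List Int), mm = k + t →
      ((PySem.List.sorted pairs (fun p => p.1)).foldl
          (fun (st : Int × Int × List Int) (q : Int × Int) =>
            (st.1 + (q.1 - st.2.1), q.1 + 1,
              st.2.2 ++ PySem.List.slice axis (some st.1) (some (st.1 + q.1 - st.2.1)) ++ [q.2]))
          (k, mm, perm)).2.2
        ++ PySem.List.slice axis
            (some (((PySem.List.sorted pairs (fun p => p.1)).foldl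
              (fun (st : Int × Int × List Int) (q : Int × Int) =>
                (st.1 + (q.1 - st.2.1), q.1 + 1,
                  st.2.2 ++ PySem.List.slice axis (some st.1) (some (st.1 + q.1 - st.2.1)) ++ [q.2]))
              (k, mm, perm)).1)) none
      = pvEmit axis pairs k t perm := by
  intro n
  induction n using Nat.strong_induction_on with
  | _ n ih =>
      intro pairs hlen k mm t perm hm
      cases pairs with
      | nil =>
          rw [show PySem.List.sorted ([] : List (Int × Int)) (fun p => p.1) = [] from rfl]
          simp [pvEmit]
      | cons q qs =>
          obtain ⟨pre, post, heq, hpre⟩ := pv_best_split qs q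
          set best := pvBest qs q with hbest
          have hpost : ∀ p ∈ post, best.1 ≤ p.1 := by
            intro p hp
            exact pv_best_min qs q p (by rw [heq]; exact List.mem_append_right _ (by simp [hp]))
          have hsort : PySem.List.sorted (q :: qs) (fun p => p.1)
              = best :: PySem.List.sorted (pre ++ post) (fun p => p.1) := by
            rw [heq]; exact pv_sorted_select pre post best hpre hpost
          rw [hsort]
          simp only [List.foldl_cons]
          have e1 : k + (best.1 - mm) = best.1 - t := by omega
          have e2 : k + best.1 - mm = best.1 - t := by omega
          rw [e1, e2]
          have hrem : (PySem.List.remove? (q :: qs) best).getD [] = pre ++ post := by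
            rw [heq, pv_remove_prefix post best pre
              (fun p hp => fun hc => by have := hpre p hp; rw [hc] at this; omega)]
            rfl
          have hlensum : qs.length = pre.length + post.length := by
            have := congrArg List.length heq
            simp at this
            omega
          have hlt : (pre ++ post).length < n := by
            simp at hlen ⊢
            omega
          rw [show pvEmit axis (q :: qs) k t perm
              = pvEmit axis ((PySem.List.remove? (q :: qs) best).getD []) (best.1 - t) (t + 1)
                  (perm ++ PySem.List.slice axis (some k) (some (best.1 - t)) ++ [best.2]) from by
            rw [pvEmit]]
          rw [hrem]
          exact ih _ hlt (pre ++ post) rfl (best.1 - t) (best.1 + 1) (t + 1) _ (by omega)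

-- ===== VERDICT (by name: the statement is the Claim_ definition above) =====
theorem get_moved_perm_py_spec : Claim_equal_get_moved_perm_py := by
  intro ndim source destination _ hpre
  unfold Spec_get_moved_perm_py get_moved_perm_py get_moved_perm_py_alt
  simp only []
  set axis := (PySem.List.pyRange 0 ndim 1).filter (fun i => decide (i ∉ source)) with haxis
  rw [List.foldl_map]
  have hcongr :
      (PySem.List.sorted (PySem.List.enumerate destination) (fun p => p.2)).foldl
        (fun (st : Int × Int × List Int) (p : Int × Int) =>
          (st.1 + (PySem.List.pyGetD destination p.1 0 - st.2.1), PySem.List.pyGetD destination p.1 0 + 1,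
            st.2.2 ++ PySem.List.slice axis (some st.1) (some (st.1 + PySem.List.pyGetD destination p.1 0 - st.2.1))
              ++ [PySem.List.pyGetD source p.1 0]))
        (0, 0, ([] : List Int))
      = (PySem.List.sorted (PySem.List.enumerate destination) (fun p => p.2)).foldl
        (fun (st : Int × Int × List Int) (p : Int × Int) =>
          (st.1 + (p.2 - st.2.1), p.2 + 1,
            st.2.2 ++ PySem.List.slice axis (some st.1) (some (st.1 + p.2 - st.2.1))
              ++ [PySem.List.pyGetD source p.1 0]))
        (0, 0, ([] : List Int)) := by
    apply PySem.List.foldl_congr_mem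
    intro acc p hp
    have hp' : p ∈ PySem.List.enumerate destination := (PySem.List.mem_sorted _ _ _ _).1 hp
    rcases (PySem.List.mem_enumerate_iff _ _ _).1 hp' with ⟨j, hj, hpe⟩
    have hd : PySem.List.pyGetD destination p.1 0 = p.2 := by
      subst hpe
      simp [PySem.List.pyGetD_natCast, List.getElem?_eq_getElem hj]
    rw [hd]
  rw [hcongr]
  have hmap :
      (PySem.List.sorted (PySem.List.enumerate destination) (fun p => p.2)).foldl
        (fun (st : Int × Int × List Int) (p : Int × Int) =>
          (st.1 + (p.2 - st.2.1), p.2 + 1,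
            st.2.2 ++ PySem.List.slice axis (some st.1) (some (st.1 + p.2 - st.2.1))
              ++ [PySem.List.pyGetD source p.1 0]))
        (0, 0, ([] : List Int))
      = (PySem.List.sorted (destination.zip source) (fun p => p.1)).foldl
        (fun (st : Int × Int × List Int) (q : Int × Int) =>
          (st.1 + (q.1 - st.2.1), q.1 + 1,
            st.2.2 ++ PySem.List.slice axis (some st.1) (some (st.1 + q.1 - st.2.1)) ++ [q.2]))
        (0, 0, ([] : List Int)) := by
    have hms := pv_map_sorted (fun (p : Int × Int) => (p.2, PySem.List.pyGetD source p.1 0))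
      (fun q => q.1) (PySem.List.enumerate destination)
    have hz : (PySem.List.enumerate destination).map
        (fun (p : Int × Int) => (p.2, PySem.List.pyGetD source p.1 0)) = destination.zip source := by
      have := pv_enum_map_zip source destination 0 (by simpa using hpre)
      simpa using this
    rw [hz] at hms
    rw [← hms, List.foldl_map]
  rw [hmap]
  exact pv_fold_emit axis (destination.zip source).length (destination.zip source) rfl 0 0 0 [] (by ring)
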